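-- pv_equiv track=rewrite | github.com/HIRO15254/competitive-programming | src/AtCoder/old_abc_arc/abc082_arc087/arc087_b.py | dp
-- ===== SOURCE A (Python) =====
-- def dp(start, lis, target):
--     ans = set()
--     ans2 = set()
--     ans.add(start)
--     for i in lis:
--         for j in ans:
--             ans2.add(j + i)
--             ans2.add(j - i)
--         ans = ans2
--         ans2 = set()
--     return target in ans
-- ===== SOURCE B (Python) =====
-- def dp(start, lis, target):
--     # Reduce to subset sum: start + sum of +/-i equals target iff
--     # t = target - start + sum(lis) is even and t//2 is a subset sum of lis.
--     t = target - start + sum(lis)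
--     if t % 2 != 0:
--         return False
--     sums = {0}
--     for i in lis:
--         sums = sums | {x + i for x in sums}
--     return t // 2 in sums
-- ===== Notes on version B (the rewrite author's own statement) =====
-- stated objective: alternative
-- what changed: Replaced the two-branch reachable-set BFS by a parity reduction to subset sum: reachable = start - sum(lis) + 2*(subset sum), so B maintains a set of subset sums adding one candidate per element and exits immediately when target - start + sum(lis) is odd.
import Mathlib
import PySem

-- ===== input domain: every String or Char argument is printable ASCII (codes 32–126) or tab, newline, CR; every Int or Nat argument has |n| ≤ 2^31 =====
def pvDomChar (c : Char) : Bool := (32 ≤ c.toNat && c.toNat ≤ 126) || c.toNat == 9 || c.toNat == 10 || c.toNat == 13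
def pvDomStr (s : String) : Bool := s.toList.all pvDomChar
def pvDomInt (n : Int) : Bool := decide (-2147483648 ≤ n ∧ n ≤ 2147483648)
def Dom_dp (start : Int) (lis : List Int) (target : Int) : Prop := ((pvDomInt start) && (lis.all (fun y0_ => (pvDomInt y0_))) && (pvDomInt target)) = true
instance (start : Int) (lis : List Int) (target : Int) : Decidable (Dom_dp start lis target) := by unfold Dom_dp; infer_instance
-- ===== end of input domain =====

-- B replaces A's two-branch reachable-set BFS by a parity reduction to subset sum
-- (reachable v = start - sum(lis) + 2*(subset sum)); same exact return value, similar cost.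


-- ===== PORT A =====
-- ans = {start}; for i in lis: ans2 = {}; for j in ans: ans2 += {j+i, j-i}; ans = ans2; return target in ans
-- (iteration over the set only builds another set, so the result is order-independent)
def dp (start : Int) (lis : List Int) (target : Int) : Bool :=
  let ans : PySem.Set Int := PySem.Set.add PySem.Set.empty start
  let ansF := lis.foldl
    (fun ans i =>
      ans.foldl (fun a2 j => PySem.Set.add (PySem.Set.add a2 (j + i)) (j - i))
        (PySem.Set.empty : PySem.Set Int))
    ans
  decide (target ∈ ansF)

-- ===== PORT B =====
-- t = target - start + sum(lis); if t % 2 != 0: return False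
-- sums = {0}; for i in lis: sums = sums | {x+i for x in sums}; return t // 2 in sums
def dp_alt (start : Int) (lis : List Int) (target : Int) : Bool :=
  let t := target - start + lis.sum
  if PySem.Int.mod t 2 ≠ 0 then false
  else
    let sums : PySem.Set Int := lis.foldl
      (fun s i => PySem.Set.union s (List.map (fun x => x + i) s))
      (PySem.Set.ofList [0])
    decide (PySem.Int.floordiv t 2 ∈ sums)

-- ===== PRECONDITION & SPEC =====
def Spec_dp (start : Int) (lis : List Int) (target : Int) (out : Bool) : Prop := out = dp_alt start lis target
instance (start : Int) (lis : List Int) (target : Int) (out : Bool) : Decidable (Spec_dp start lis target out) := by unfold Spec_dp; infer_instance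

-- ===== CLAIM (what is proved, stated in full; the proofs are below) =====
def Claim_equal_dp : Prop := ∀ (start : Int) (lis : List Int) (target : Int), Dom_dp start lis target → Spec_dp start lis target (dp start lis target)

-- ===== LEMMAS AND PROOFS =====

-- membership in A's inner fold (one ± step)
lemma memA_step (i : Int) : ∀ (l : List Int) (acc : PySem.Set Int) (v : Int),
    v ∈ l.foldl (fun a2 j => PySem.Set.add (PySem.Set.add a2 (j + i)) (j - i)) acc ↔
      v ∈ acc ∨ ∃ w ∈ l, v = w + i ∨ v = w - i := by
  intro l
  induction l with
  | nil => simp [List.foldl]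
  | cons j l ih =>
    intro acc v
    simp only [List.foldl_cons, ih, PySem.Set.mem_add, List.mem_cons]
    constructor
    · rintro (((h | h) | h) | ⟨w, hw, h⟩)
      · exact Or.inl h
      · exact Or.inr ⟨j, Or.inl rfl, Or.inl h⟩
      · exact Or.inr ⟨j, Or.inl rfl, Or.inr h⟩
      · exact Or.inr ⟨w, Or.inr hw, h⟩
    · rintro (h | ⟨w, (rfl | hw), h⟩)
      · exact Or.inl (Or.inl (Or.inl h))
      · rcases h with h | h
        · exact Or.inl (Or.inl (Or.inr h))
        · exact Or.inl (Or.inr h)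
      · exact Or.inr ⟨w, hw, h⟩

-- the main invariant: A's running set is start + 2u - P for u in B's running subset-sum set
lemma inv (start : Int) : ∀ (l : List Int) (A S : PySem.Set Int) (P : Int),
    (∀ v : Int, v ∈ A ↔ ∃ u ∈ S, v = start + 2 * u - P) →
    ∀ v : Int,
      v ∈ l.foldl
          (fun ans i =>
            ans.foldl (fun a2 j => PySem.Set.add (PySem.Set.add a2 (j + i)) (j - i))
              (PySem.Set.empty : PySem.Set Int)) A ↔
        ∃ u ∈ l.foldl (fun s i => PySem.Set.union s (List.map (fun x => x + i) s)) S,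
          v = start + 2 * u - (P + l.sum) := by
  intro l
  induction l with
  | nil => intro A S P H v; simpa using H v
  | cons i l ih =>
    intro A S P H v
    simp only [List.foldl_cons, List.sum_cons]
    have key : ∀ w : Int,
        w ∈ A.foldl (fun a2 j => PySem.Set.add (PySem.Set.add a2 (j + i)) (j - i))
            (PySem.Set.empty : PySem.Set Int) ↔
          ∃ u ∈ PySem.Set.union S (List.map (fun x => x + i) S), w = start + 2 * u - (P + i) := by
      intro w
      rw [memA_step]
      simp only [PySem.Set.mem_union, List.mem_map, PySem.Set.empty, List.not_mem_nil, false_or]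
      constructor
      · rintro ⟨x, hx, h | h⟩
        · rcases (H x).1 hx with ⟨u, hu, rfl⟩
          exact ⟨u + i, Or.inr ⟨u, hu, rfl⟩, by omega⟩
        · rcases (H x).1 hx with ⟨u, hu, rfl⟩
          exact ⟨u, Or.inl hu, by omega⟩
      · rintro ⟨u, hu | ⟨x, hx, rfl⟩, rfl⟩
        · exact ⟨start + 2 * u - P, (H _).2 ⟨u, hu, rfl⟩, Or.inr (by ring)⟩
        · exact ⟨start + 2 * x - P, (H _).2 ⟨x, hx, rfl⟩, Or.inl (by ring)⟩
    have := ih _ _ (P + i) key v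
    rw [this]
    constructor
    · rintro ⟨u, hu, rfl⟩; exact ⟨u, hu, by ring⟩
    · rintro ⟨u, hu, rfl⟩; exact ⟨u, hu, by ring⟩

-- ===== VERDICT (by name: the statement is the Claim_ definition above) =====
theorem dp_spec : Claim_equal_dp := by
  intro start lis target _
  show dp start lis target = dp_alt start lis target
  unfold dp dp_alt
  have base : ∀ v : Int, v ∈ PySem.Set.add PySem.Set.empty start ↔
      ∃ u ∈ PySem.Set.ofList [(0 : Int)], v = start + 2 * u - 0 := by
    intro v
    simp [PySem.Set.mem_ofList]
  have h := inv start lis _ _ 0 base target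
  simp only [zero_add] at h
  by_cases hpar : PySem.Int.mod (target - start + lis.sum) 2 = 0
  · -- t is even: both sides reduce to membership
    rcases (PySem.Int.mod_eq_zero_iff_dvd _ _).1 hpar with ⟨u0, hu0⟩
    simp only [hpar, ne_eq, not_true_eq_false, if_false]
    rw [decide_eq_decide, h]
    have hfd : PySem.Int.floordiv (target - start + lis.sum) 2 = u0 := by
      rw [PySem.Int.floordiv_eq_ediv_of_pos (by omega)]; omega
    rw [hfd]
    constructor
    · rintro ⟨u, hu, hv⟩
      have : u = u0 := by omega
      subst this; exact hu
    · intro hu; exact ⟨u0, hu, by omega⟩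
  · -- t is odd: A's membership is impossible
    simp only [hpar, ne_eq, not_false_eq_true, if_true]
    rw [decide_eq_false_iff_not, h]
    rintro ⟨u, hu, hv⟩
    apply hpar
    rw [PySem.Int.mod_eq_zero_iff_dvd]
    exact ⟨u, by omega⟩
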